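-- pv_equiv track=rewrite | github.com/GValiente/gba-niccc | data_generator/export.py | generate_shapes
-- ===== SOURCE A (Python) =====
-- def generate_shapes(horizontal_line_groups):
--     shapes = []
--
--     for horizontal_line_group in horizontal_line_groups:
--         shape_lines = []
--         shape_start_y = 0
--         shape_current_y = 0
--         shape_current_color_index = 0
--
--         for line_y, line_pair in enumerate(horizontal_line_group):
--             if line_pair is None:
--                 if len(shape_lines) > 0:
--                     shapes.append((shape_current_color_index, shape_start_y, shape_current_y, shape_lines))
--                     shape_lines = []
--             else:
--                 color_index = line_pair[0]
--                 line = line_pair[1]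
--
--                 if len(shape_lines) > 0 and (shape_current_color_index != color_index):
--                     shapes.append((shape_current_color_index, shape_start_y, shape_current_y, shape_lines))
--                     shape_lines = []
--
--                 if len(shape_lines) == 0:
--                     shape_start_y = line_y
--
--                 shape_current_y = line_y
--                 shape_current_color_index = color_index
--                 shape_lines.append((line[1], line[2]))
--
--         if len(shape_lines) > 0:
--             shapes.append((shape_current_color_index, shape_start_y, shape_current_y, shape_lines))
--
--     return shapes
-- ===== SOURCE B (Python) =====
-- def generate_shapes(horizontal_line_groups):
--     shapes = []
--     for group in horizontal_line_groups:
--         n = len(group)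
--         i = 0
--         while i < n:
--             if group[i] is None:
--                 i += 1
--                 continue
--             color = group[i][0]
--             lines = []
--             j = i
--             while j < n and group[j] is not None and group[j][0] == color:
--                 lines.append((group[j][1][1], group[j][1][2]))
--                 j += 1
--             shapes.append((color, i, j - 1, lines))
--             i = j
--     return shapes
-- ===== Notes on version B (the rewrite author's own statement) =====
-- stated objective: simpler
-- what changed: Replaced A's stateful flush-on-None/flush-on-color-change/flush-at-end accumulator machinery with a direct two-index scan that extracts each maximal same-color run in one inner pass and emits its shape immediately.
import Mathlib
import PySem

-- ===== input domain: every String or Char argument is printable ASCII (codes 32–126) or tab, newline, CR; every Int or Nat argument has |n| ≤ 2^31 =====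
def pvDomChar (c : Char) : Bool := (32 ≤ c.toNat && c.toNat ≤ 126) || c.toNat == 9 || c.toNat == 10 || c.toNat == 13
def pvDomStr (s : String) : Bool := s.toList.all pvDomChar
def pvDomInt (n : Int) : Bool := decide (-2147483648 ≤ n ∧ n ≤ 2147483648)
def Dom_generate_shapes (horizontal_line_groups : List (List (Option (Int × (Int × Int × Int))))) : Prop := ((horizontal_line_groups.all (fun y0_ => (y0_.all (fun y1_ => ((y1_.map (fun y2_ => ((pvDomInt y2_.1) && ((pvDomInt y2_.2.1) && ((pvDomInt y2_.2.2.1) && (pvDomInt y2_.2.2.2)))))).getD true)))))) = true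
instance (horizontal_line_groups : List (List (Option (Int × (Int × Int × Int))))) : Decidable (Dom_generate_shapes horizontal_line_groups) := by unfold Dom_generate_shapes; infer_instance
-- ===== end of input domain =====

-- B change in one line: B replaces A's flush-on-None/flush-on-color-change/flush-at-end
-- accumulator state machine by a direct two-index scan extracting each maximal same-color run.

-- ===== PORT A =====
-- state = (shapes, shape_lines, shape_start_y, shape_current_y, shape_current_color_index)
def stepA :
    (List (Int × Int × Int × (List (Int × Int))) × List (Int × Int) × Int × Int × Int) →
    (Int × Option (Int × (Int × Int × Int))) →
    (List (Int × Int × Int × (List (Int × Int))) × List (Int × Int) × Int × Int × Int)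
  | (shapes, lines, sy, cy, cc), (_, none) =>
      if lines.length > 0 then (shapes ++ [(cc, sy, cy, lines)], [], sy, cy, cc)
      else (shapes, lines, sy, cy, cc)
  | (shapes, lines, sy, cy, cc), (y, some (c, l)) =>
      let p := if lines.length > 0 && decide (cc ≠ c)
               then (shapes ++ [(cc, sy, cy, lines)], ([] : List (Int × Int)))
               else (shapes, lines)
      let sy1 := if p.2.length = 0 then y else sy
      (p.1, p.2 ++ [(l.2.1, l.2.2)], sy1, y, c)

def generate_shapes (horizontal_line_groups : List (List (Option (Int × (Int × Int × Int))))) : List (Int × Int × Int × (List (Int × Int))) :=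
  horizontal_line_groups.foldl (fun shapes g =>
    let st := (PySem.List.enumerate g).foldl stepA (shapes, [], 0, 0, 0)
    if st.2.1.length > 0 then st.1 ++ [(st.2.2.2.2, st.2.2.1, st.2.2.2.1, st.2.1)] else st.1) []

-- ===== PORT B =====
-- inner while loop of Source B: collect the maximal run of same-color lines following the head
def altRun (color : Int) : List (Option (Int × (Int × Int × Int))) → (List (Int × Int) × Nat)
  | some (c, l) :: rest =>
      if c = color then
        let r := altRun color rest
        ((l.2.1, l.2.2) :: r.1, r.2 + 1)
      else ([], 0)
  | _ => ([], 0)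

-- outer while loop of Source B, i = current index
def altOuter (i : Int) : List (Option (Int × (Int × Int × Int))) → List (Int × Int × Int × (List (Int × Int)))
  | [] => []
  | none :: rest => altOuter (i + 1) rest
  | some (c, l) :: rest =>
      let r := altRun c rest
      (c, i, i + (r.2 : Int), (l.2.1, l.2.2) :: r.1) :: altOuter (i + 1 + (r.2 : Int)) (rest.drop r.2)
  termination_by xs => xs.length
  decreasing_by
    all_goals simp only [List.length_drop, List.length_cons]
    all_goals omega

def generate_shapes_alt (horizontal_line_groups : List (List (Option (Int × (Int × Int × Int))))) : List (Int × Int × Int × (List (Int × Int))) :=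
  horizontal_line_groups.foldl (fun shapes g => shapes ++ altOuter 0 g) []

-- ===== PRECONDITION & SPEC =====
def Spec_generate_shapes (horizontal_line_groups : List (List (Option (Int × (Int × Int × Int))))) (out : List (Int × Int × Int × (List (Int × Int)))) : Prop := out = generate_shapes_alt horizontal_line_groups
instance (horizontal_line_groups : List (List (Option (Int × (Int × Int × Int))))) (out : List (Int × Int × Int × (List (Int × Int)))) : Decidable (Spec_generate_shapes horizontal_line_groups out) := by unfold Spec_generate_shapes; infer_instance

-- ===== CLAIM (what is proved, stated in full; the proofs are below) =====
def Claim_equal_generate_shapes : Prop := ∀ (horizontal_line_groups : List (List (Option (Int × (Int × Int × Int))))), Dom_generate_shapes horizontal_line_groups → Spec_generate_shapes horizontal_line_groups (generate_shapes horizontal_line_groups)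

-- ===== LEMMAS AND PROOFS =====

-- final flush of A's inner loop
def finishA (st : List (Int × Int × Int × (List (Int × Int))) × List (Int × Int) × Int × Int × Int) : List (Int × Int × Int × (List (Int × Int))) :=
  if st.2.1.length > 0 then st.1 ++ [(st.2.2.2.2, st.2.2.1, st.2.2.2.1, st.2.1)] else st.1

-- combined invariant: A's inner fold from the empty state equals altOuter; from a
-- nonempty-run state it first closes the current run (altRun) and then continues.
def Pkey (xs : List (Option (Int × (Int × Int × Int)))) : Prop :=
  (∀ (i : Int) shapes sy cy cc,
      finishA ((PySem.List.enumerate xs i).foldl stepA (shapes, [], sy, cy, cc)) =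
        shapes ++ altOuter i xs) ∧
  (∀ (cy : Int) shapes lines sy cc, lines ≠ [] →
      finishA ((PySem.List.enumerate xs (cy + 1)).foldl stepA (shapes, lines, sy, cy, cc)) =
        shapes ++ (cc, sy, cy + ((altRun cc xs).2 : Int), lines ++ (altRun cc xs).1) ::
          altOuter (cy + 1 + ((altRun cc xs).2 : Int)) (xs.drop (altRun cc xs).2))

theorem Pkey_nil : Pkey [] := by
  constructor
  · intro i shapes sy cy cc
    simp [PySem.List.enumerate, finishA, altOuter]
  · intro cy shapes lines sy cc hl
    simp [PySem.List.enumerate, finishA, altRun, altOuter, hl, List.length_pos_iff]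

theorem keyP : ∀ (n : Nat) (xs : List (Option (Int × (Int × Int × Int)))), xs.length ≤ n → Pkey xs := by
  intro n
  induction n with
  | zero =>
    intro xs hx
    have hxe : xs = [] := List.length_eq_zero_iff.mp (Nat.le_zero.mp hx)
    exact hxe ▸ Pkey_nil
  | succ n ih =>
    intro xs hx
    match xs with
    | [] => exact Pkey_nil
    | x :: rest =>
      have hr : rest.length ≤ n := by simpa using Nat.succ_le_succ_iff.mp hx
      have IH := ih rest hr
      constructor
      · -- empty-state lemma
        intro i shapes sy cy cc
        match x with
        | none =>
          simp only [PySem.List.enumerate_cons, List.foldl_cons, stepA, List.length_nil, gt_iff_lt, lt_irrefl]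
          rw [altOuter.eq_def]
          simpa using IH.1 (i + 1) shapes sy cy cc
        | some (c, l) =>
          simp only [PySem.List.enumerate_cons, List.foldl_cons, stepA, List.length_nil, lt_irrefl]
          have h2 := IH.2 i shapes [(l.2.1, l.2.2)] i c (by simp)
          rw [show (i : Int) + 1 = i + 1 from rfl] at h2
          rw [altOuter.eq_def]
          simp only []
          simp only [List.singleton_append] at h2
          simpa using h2
      · -- run-state lemma
        intro cy shapes lines sy cc hl
        have hlp : 0 < lines.length := List.length_pos_iff.mpr hl
        match x with
        | none =>
          simp only [PySem.List.enumerate_cons, List.foldl_cons, stepA, if_pos hlp]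
          have h1 := IH.1 (cy + 1 + 1) (shapes ++ [(cc, sy, cy, lines)]) sy cy cc
          rw [show altRun cc (none :: rest) = ([], 0) from rfl]
          simp only [Nat.cast_zero, add_zero, List.append_nil, List.drop_zero]
          rw [show altOuter (cy + 1) (none :: rest) = altOuter (cy + 1 + 1) rest from by
            rw [altOuter.eq_def]]
          rw [h1]
          simp [List.append_assoc]
        | some (c, l) =>
          by_cases hc : cc = c
          · subst hc
            simp only [PySem.List.enumerate_cons, List.foldl_cons, stepA, ne_eq,
              not_true_eq_false, decide_false, Bool.and_false, if_neg, Bool.false_eq_true,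
              not_false_eq_true, List.length_eq_zero_iff, hl]
            have h2 := IH.2 (cy + 1) shapes (lines ++ [(l.2.1, l.2.2)]) sy cc (by simp)
            rw [show altRun cc (some (cc, l) :: rest) =
                  ((l.2.1, l.2.2) :: (altRun cc rest).1, (altRun cc rest).2 + 1) from by
                simp [altRun]]
            simp only [List.drop_succ_cons]
            have hcast : (((altRun cc rest).2 + 1 : Nat) : Int) = ((altRun cc rest).2 : Int) + 1 := by
              push_cast; ring
            rw [hcast]
            rw [show cy + (((altRun cc rest).2 : Int) + 1) = cy + 1 + ((altRun cc rest).2 : Int) from by ring]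
            rw [show cy + 1 + (((altRun cc rest).2 : Int) + 1) = cy + 1 + 1 + ((altRun cc rest).2 : Int) from by ring]
            simpa [List.append_assoc] using h2
          · simp only [PySem.List.enumerate_cons, List.foldl_cons, stepA, ne_eq, hc,
              not_false_eq_true, decide_true, Bool.and_true,
              List.length_pos_iff.mpr hl]
            have h2 := IH.2 (cy + 1) (shapes ++ [(cc, sy, cy, lines)]) [(l.2.1, l.2.2)] (cy + 1) c (by simp)
            rw [show altRun cc (some (c, l) :: rest) = ([], 0) from by simp [altRun, Ne.symm hc]]
            rw [altOuter.eq_def]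
            simp only [List.drop_zero]
            simpa using h2

theorem fold_eq : ∀ (gs : List (List (Option (Int × (Int × Int × Int))))) (acc : List (Int × Int × Int × (List (Int × Int)))),
    gs.foldl (fun shapes g =>
      let st := (PySem.List.enumerate g).foldl stepA (shapes, [], 0, 0, 0)
      if st.2.1.length > 0 then st.1 ++ [(st.2.2.2.2, st.2.2.1, st.2.2.2.1, st.2.1)] else st.1) acc
    = gs.foldl (fun shapes g => shapes ++ altOuter 0 g) acc := by
  intro gs
  induction gs with
  | nil => intro acc; rfl
  | cons g gs ihg =>
    intro acc
    simp only [List.foldl_cons]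
    have h := (keyP g.length g le_rfl).1 0 acc 0 0 0
    unfold finishA at h
    rw [h]
    exact ihg _

-- ===== VERDICT (by name: the statement is the Claim_ definition above) =====
theorem generate_shapes_spec : Claim_equal_generate_shapes := by
  intro gs _
  unfold Spec_generate_shapes generate_shapes generate_shapes_alt
  exact fold_eq gs []
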